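-- pv_equiv track=rewrite | github.com/AdlinZ/ORIN | orin-ai-engine/app/api/playground_runtime.py | _choose_agent_for_task
-- ===== SOURCE A (Python) =====
-- from typing import Any
--
-- def text(value: Any, fallback: str = "") -> str:
--     if value is None:
--         return fallback
--     value = str(value).strip()
--     return value or fallback
--
-- def agent_id(agent: dict[str, Any], fallback: str) -> str:
--     return text(agent.get("id"), fallback)
--
-- def _choose_agent_for_task(task_text: str, role: str, agents: list[dict[str, Any]]) -> str:
--     if not agents:
--         return ""
--     lowered = f"{role} {task_text}".lower()
--     ranked: list[tuple[int, dict[str, Any]]] = []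
--     for index, agent in enumerate(agents):
--         profile = f"{agent.get('name', '')} {agent.get('description', '')} {agent.get('system_prompt', '')}".lower()
--         score = sum(1 for token in lowered.split() if len(token) > 1 and token in profile)
--         ranked.append((score * 10 - index, agent))
--     ranked.sort(key=lambda item: item[0], reverse=True)
--     return agent_id(ranked[0][1], "") if ranked else agent_id(agents[0], "")
-- ===== SOURCE B (Python) =====
-- def _choose_agent_for_task(task_text: str, role: str, agents: list) -> str:
--     if not agents:
--         return ""
--     tokens = f"{role} {task_text}".lower().split()
--
--     def score(agent) -> int:
--         profile = f"{agent.get('name', '')} {agent.get('description', '')} {agent.get('system_prompt', '')}".lower()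
--         return sum(1 for token in tokens if len(token) > 1 and token in profile)
--
--     best_key, best = score(agents[0]) * 10, agents[0]
--     for index, agent in enumerate(agents[1:], start=1):
--         key = score(agent) * 10 - index
--         if best_key < key:
--             best_key, best = key, agent
--     return (best.get("id") or "").strip()
-- ===== Notes on version B (the rewrite author's own statement) =====
-- stated objective: faster
-- what changed: A builds a (key, agent) list for every agent and stably sorts it descending to take the first element; B does a single-pass argmax over enumerate(agents), keeping best_key/best and updating only on a strictly greater key (so the lower index wins ties, as A's stable sort does), eliminating the ranked list and the sort.
import Mathlib
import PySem

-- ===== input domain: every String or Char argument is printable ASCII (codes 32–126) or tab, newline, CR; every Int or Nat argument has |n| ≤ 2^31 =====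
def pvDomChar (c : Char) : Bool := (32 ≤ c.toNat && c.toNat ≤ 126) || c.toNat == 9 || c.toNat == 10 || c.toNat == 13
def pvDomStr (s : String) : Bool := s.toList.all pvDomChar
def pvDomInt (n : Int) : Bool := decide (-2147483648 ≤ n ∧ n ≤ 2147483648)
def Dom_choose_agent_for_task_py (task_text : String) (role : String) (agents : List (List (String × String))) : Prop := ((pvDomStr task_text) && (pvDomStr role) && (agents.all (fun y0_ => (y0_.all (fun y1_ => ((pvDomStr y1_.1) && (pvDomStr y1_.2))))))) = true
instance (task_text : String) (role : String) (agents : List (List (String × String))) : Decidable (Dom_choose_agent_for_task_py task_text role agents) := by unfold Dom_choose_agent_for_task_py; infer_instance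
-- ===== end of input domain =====

-- B replaces A's build-ranked-list-then-stable-sort-descending by a single-pass argmax
-- (strictly-greater updates, so the lower index wins ties exactly as A's stable sort does).

-- ===== PORT A =====
-- text(value, fallback): None -> fallback; else str(value).strip() or fallback
def pvTextA (value : Option String) (fallback : String) : String :=
  match value with
  | none => fallback
  | some v =>
    let v := PySem.Str.strip v
    if v = "" then fallback else v

-- agent_id(agent, fallback) = text(agent.get("id"), fallback)
def pvAgentIdA (agent : List (String × String)) (fallback : String) : String :=
  pvTextA ((PySem.Dict.mk agent).get? "id") fallback

def choose_agent_for_task_py (task_text : String) (role : String) (agents : List (List (String × String))) : String :=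
  if agents = [] then ""
  else
    let lowered := PySem.Str.lower (role ++ " " ++ task_text)
    let ranked : List (Int × List (String × String)) :=
      (PySem.List.enumerate agents).foldl
        (fun acc p =>
          let profile := PySem.Str.lower
            ((PySem.Dict.mk p.2).getD "name" "" ++ " " ++ (PySem.Dict.mk p.2).getD "description" "" ++ " " ++ (PySem.Dict.mk p.2).getD "system_prompt" "")
          let score : Int := (PySem.Str.split₀ lowered).foldl
            (fun s token => if PySem.Str.len token > 1 && PySem.Str.isIn token profile then s + 1 else s) 0
          acc ++ [(score * 10 - p.1, p.2)]) []
    match PySem.List.sorted ranked (fun item => item.1) true with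
    | item :: _ => pvAgentIdA item.2 ""
    | [] => pvAgentIdA (agents.headD []) ""

-- ===== PORT B =====
def pvScoreB (tokens : List String) (agent : List (String × String)) : Int :=
  let profile := PySem.Str.lower
    ((PySem.Dict.mk agent).getD "name" "" ++ " " ++ (PySem.Dict.mk agent).getD "description" "" ++ " " ++ (PySem.Dict.mk agent).getD "system_prompt" "")
  tokens.foldl (fun s token => if PySem.Str.len token > 1 && PySem.Str.isIn token profile then s + 1 else s) 0

def choose_agent_for_task_py_alt (task_text : String) (role : String) (agents : List (List (String × String))) : String :=
  match agents with
  | [] => ""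
  | a0 :: rest =>
    let tokens := PySem.Str.split₀ (PySem.Str.lower (role ++ " " ++ task_text))
    let best :=
      (PySem.List.enumerate rest 1).foldl
        (fun best p =>
          let key := pvScoreB tokens p.2 * 10 - p.1
          if best.1 < key then (key, p.2) else best)
        (pvScoreB tokens a0 * 10, a0)
    PySem.Str.strip ((PySem.Dict.mk best.2).getD "id" "")

-- ===== PRECONDITION & SPEC =====
def Spec_choose_agent_for_task_py (task_text : String) (role : String) (agents : List (List (String × String))) (out : String) : Prop := out = choose_agent_for_task_py_alt task_text role agents
instance (task_text : String) (role : String) (agents : List (List (String × String))) (out : String) : Decidable (Spec_choose_agent_for_task_py task_text role agents out) := by unfold Spec_choose_agent_for_task_py; infer_instance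

-- ===== CLAIM (what is proved, stated in full; the proofs are below) =====
def Claim_equal_choose_agent_for_task_py : Prop := ∀ (task_text : String) (role : String) (agents : List (List (String × String))), Dom_choose_agent_for_task_py task_text role agents → Spec_choose_agent_for_task_py task_text role agents (choose_agent_for_task_py task_text role agents)

-- ===== LEMMAS AND PROOFS =====

-- A's append-accumulating loop builds the mapped list
lemma foldl_append_singleton_map {α β : Type} (f : α → β) :
    ∀ (l : List α) (acc : List β),
      l.foldl (fun a x => a ++ [f x]) acc = acc ++ l.map f := by
  intro l
  induction l with
  | nil => simp
  | cons x t ih => intro acc; simp [List.foldl, ih]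

-- the head of the reverse-stable insertion sort fold is the strict-greater argmax
lemma head?_foldl_insertBy {α : Type} (key : α → Int) :
    ∀ (l : List α) (b : α) (ys : List α),
      (l.foldl (fun a x => PySem.List.insertBy (fun p q => decide (key q < key p)) x a) (b :: ys)).head? =
        some (l.foldl (fun best x => if key best < key x then x else best) b) := by
  intro l
  induction l with
  | nil => simp
  | cons x t ih =>
    intro b ys
    simp only [List.foldl, PySem.List.insertBy]
    by_cases h : key b < key x
    · simp only [h, decide_true, if_true]
      rw [ih x (b :: ys)]
    · simp only [h, decide_false, Bool.false_eq_true, if_false]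
      rw [ih b (PySem.List.insertBy (fun p q => decide (key q < key p)) x ys)]

lemma head?_sorted_rev_cons {α : Type} (key : α → Int) (b : α) (t : List α) :
    (PySem.List.sorted (b :: t) key true).head? =
      some (t.foldl (fun best x => if key best < key x then x else best) b) := by
  rw [PySem.List.sorted_rev_eq_foldl_insertBy]
  simp only [List.foldl, PySem.List.insertBy]
  exact head?_foldl_insertBy key t b []

-- A's agent_id with fallback "" is just strip of the looked-up id
lemma agentIdA_eq_strip (agent : List (String × String)) :
    pvAgentIdA agent "" = PySem.Str.strip ((PySem.Dict.mk agent).getD "id" "") := by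
  unfold pvAgentIdA pvTextA
  rw [PySem.Dict.getD_eq_get?_getD]
  cases h : (PySem.Dict.mk agent).get? "id" with
  | none =>
    simp only [Option.getD]
    decide
  | some v =>
    simp only [Option.getD]
    split_ifs with hv
    · exact hv.symm
    · rfl

-- reducing sorted-then-first to the single-pass argmax, for any scoring function g
lemma pick_eq (g : List (String × String) → Int) (a0 : List (String × String))
    (rest : List (List (String × String))) :
    (match PySem.List.sorted
        ((g a0 * 10 - 0, a0) :: (PySem.List.enumerate rest 1).map (fun p => (g p.2 * 10 - p.1, p.2)))
        (fun item => item.1) true with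
      | item :: _ => pvAgentIdA item.2 ""
      | [] => pvAgentIdA ((a0 :: rest).headD []) "") =
    PySem.Str.strip ((PySem.Dict.mk
      ((PySem.List.enumerate rest 1).foldl
        (fun best p => if best.1 < g p.2 * 10 - p.1 then (g p.2 * 10 - p.1, p.2) else best)
        (g a0 * 10, a0)).2).getD "id" "") := by
  have h := head?_sorted_rev_cons (fun item : Int × List (String × String) => item.1)
    ((g a0 * 10 - 0, a0)) ((PySem.List.enumerate rest 1).map (fun p => (g p.2 * 10 - p.1, p.2)))
  cases hs : PySem.List.sorted
      ((g a0 * 10 - 0, a0) :: (PySem.List.enumerate rest 1).map (fun p => (g p.2 * 10 - p.1, p.2)))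
      (fun item => item.1) true with
  | nil => rw [hs] at h; simp at h
  | cons item tail =>
    rw [hs] at h
    simp only [List.head?_cons, Option.some.injEq] at h
    simp only []
    rw [agentIdA_eq_strip, h, List.foldl_map]
    simp [sub_zero]

-- ===== VERDICT (by name: the statement is the Claim_ definition above) =====
theorem choose_agent_for_task_py_spec : Claim_equal_choose_agent_for_task_py := by
  intro task_text role agents _
  unfold Spec_choose_agent_for_task_py choose_agent_for_task_py choose_agent_for_task_py_alt
  cases agents with
  | nil => simp
  | cons a0 rest =>
    simp only [reduceCtorEq, if_false]
    rw [foldl_append_singleton_map]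
    rw [List.nil_append, PySem.List.enumerate_cons, List.map_cons]
    exact pick_eq (fun ag => (PySem.Str.split₀ (PySem.Str.lower (role ++ " " ++ task_text))).foldl
      (fun s token => if PySem.Str.len token > 1 && PySem.Str.isIn token (PySem.Str.lower
        ((PySem.Dict.mk ag).getD "name" "" ++ " " ++ (PySem.Dict.mk ag).getD "description" "" ++ " " ++
          (PySem.Dict.mk ag).getD "system_prompt" "")) then s + 1 else s) 0) a0 rest
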